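-- pv_equiv track=rewrite | github.com/Sonnyxpj/programacion | vectores_puntos.py | depurador_lista3d
-- ===== SOURCE A (Python) =====
-- def depurador_lista3d(coordenadas):
--     eje_x = []
--     eje_y = []
--     eje_z = []
--     for x in coordenadas[1]:
--         eje_x.append(x[0])
--     for y in coordenadas[1]:
--         eje_y.append(y[1])
--     for z in coordenadas[1]:
--         eje_z.append(z[2])
--
--     return eje_x, eje_y, eje_z
-- ===== SOURCE B (Python) =====
-- def depurador_lista3d(coordenadas):
--     plano = [v for p in coordenadas[1] for v in (p[0], p[1], p[2])]
--     return plano[0::3], plano[1::3], plano[2::3]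
-- ===== Notes on version B (the rewrite author's own statement) =====
-- stated objective: alternative
-- what changed: Instead of three per-axis append loops, B flattens all points into one interleaved list and recovers each axis by stride slicing (plano[0::3], plano[1::3], plano[2::3]).
import Mathlib
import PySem

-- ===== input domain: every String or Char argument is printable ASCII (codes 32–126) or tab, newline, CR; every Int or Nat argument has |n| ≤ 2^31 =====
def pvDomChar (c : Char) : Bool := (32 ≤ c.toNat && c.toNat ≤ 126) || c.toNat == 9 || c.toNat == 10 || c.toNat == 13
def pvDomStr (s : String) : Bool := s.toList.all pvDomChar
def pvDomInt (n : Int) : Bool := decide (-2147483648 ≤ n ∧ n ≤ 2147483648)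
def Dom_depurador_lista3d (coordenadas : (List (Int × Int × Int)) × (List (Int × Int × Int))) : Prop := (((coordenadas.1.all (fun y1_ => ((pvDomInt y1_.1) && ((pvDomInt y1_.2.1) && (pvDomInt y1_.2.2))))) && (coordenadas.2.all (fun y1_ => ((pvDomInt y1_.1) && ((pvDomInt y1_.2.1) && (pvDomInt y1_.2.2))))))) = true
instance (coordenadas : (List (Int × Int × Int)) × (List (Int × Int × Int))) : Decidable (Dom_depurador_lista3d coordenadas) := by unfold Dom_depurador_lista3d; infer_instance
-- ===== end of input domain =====

-- B flattens the points into one interleaved list and recovers each axis by stride slicing ([0::3], [1::3], [2::3]) instead of A's three per-axis append loops (alternative algorithm, same cost).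
-- ===== PORT A =====
def depurador_lista3d (coordenadas : (List (Int × Int × Int)) × (List (Int × Int × Int))) : List Int × List Int × List Int :=
  let eje_x := coordenadas.2.foldl (fun acc x => acc ++ [x.1]) []
  let eje_y := coordenadas.2.foldl (fun acc y => acc ++ [y.2.1]) []
  let eje_z := coordenadas.2.foldl (fun acc z => acc ++ [z.2.2]) []
  (eje_x, eje_y, eje_z)

-- ===== PORT B =====
-- plano[s::3] is PySem.List.slice? plano (some s) none 3; step 3 ≠ 0, so it never fails (.getD [] is a totality guard only)
def depurador_lista3d_alt (coordenadas : (List (Int × Int × Int)) × (List (Int × Int × Int))) : List Int × List Int × List Int :=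
  let plano := coordenadas.2.flatMap (fun p => [p.1, p.2.1, p.2.2])
  ((PySem.List.slice? plano (some 0) none 3).getD [],
   (PySem.List.slice? plano (some 1) none 3).getD [],
   (PySem.List.slice? plano (some 2) none 3).getD [])

-- ===== PRECONDITION & SPEC =====
def Spec_depurador_lista3d (coordenadas : (List (Int × Int × Int)) × (List (Int × Int × Int))) (out : List Int × List Int × List Int) : Prop := out = depurador_lista3d_alt coordenadas
instance (coordenadas : (List (Int × Int × Int)) × (List (Int × Int × Int))) (out : List Int × List Int × List Int) : Decidable (Spec_depurador_lista3d coordenadas out) := by unfold Spec_depurador_lista3d; infer_instance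

-- ===== CLAIM =====
def Claim_equal_depurador_lista3d : Prop := ∀ (coordenadas : (List (Int × Int × Int)) × (List (Int × Int × Int))), Dom_depurador_lista3d coordenadas → Spec_depurador_lista3d coordenadas (depurador_lista3d coordenadas)

-- ===== LEMMAS AND PROOFS =====
lemma pv_foldl_append_map {α β : Type} (f : α → β) (l : List α) (a : List β) :
    l.foldl (fun acc x => acc ++ [f x]) a = a ++ l.map f := by
  induction l generalizing a with
  | nil => simp
  | cons h t ih => simp [List.foldl, ih]

-- evaluation of xs[s::3] for a natural start within bounds
lemma pv_slice?_nat_from3 {α : Type} (xs : List α) (s : ℕ) (h : s ≤ xs.length) :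
    PySem.List.slice? xs (some (s : ℤ)) none 3 =
      some ((List.range ((xs.length - s + 2) / 3)).filterMap (fun k => xs[s + 3 * k]?)) := by
  simp only [PySem.List.slice?, PySem.List.sliceIndices]
  norm_num
  have hmin : min (s : ℤ) (xs.length : ℤ) = (s : ℤ) := by omega
  have hns : ¬ ((s : ℤ) < 0) := by omega
  simp only [hns, if_false, hmin]
  have hcount : (if (s : ℤ) < ↑xs.length then (((↑xs.length - (s:ℤ)) + 3 - 1) / 3).toNat else 0)
      = (xs.length - s + 2) / 3 := by
    by_cases hlt : (s : ℤ) < ↑xs.length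
    · rw [if_pos hlt]; omega
    · rw [if_neg hlt]; omega
  rw [hcount]
  apply List.filterMap_congr
  intro k _
  have : ((s : ℤ) + 3 * (k : ℤ)).toNat = s + 3 * k := by omega
  rw [this]

lemma pv_flat_len (l : List (Int × Int × Int)) :
    (l.flatMap (fun p => [p.1, p.2.1, p.2.2])).length = 3 * l.length := by
  induction l with
  | nil => simp
  | cons p t ih => simp [ih]; ring

lemma pv_stride (l : List (Int × Int × Int)) (s : ℕ) (g : (Int × Int × Int) → Int)
    (hg : ∀ p : Int × Int × Int, [p.1, p.2.1, p.2.2][s]? = some (g p)) (hs : s < 3) :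
    (List.range l.length).filterMap
      (fun k => (l.flatMap (fun p => [p.1, p.2.1, p.2.2]))[s + 3 * k]?) = l.map g := by
  induction l with
  | nil => simp
  | cons p t ih =>
    rw [List.length_cons, List.range_succ_eq_map, List.filterMap_cons, List.filterMap_map]
    have h0 : (((p :: t).flatMap (fun p => [p.1, p.2.1, p.2.2])))[s + 3 * 0]? = some (g p) := by
      have := hg p
      interval_cases s <;> simpa using this
    rw [show (fun k => ((p :: t).flatMap (fun p => [p.1, p.2.1, p.2.2]))[s + 3 * k]?) ∘ Nat.succ
        = fun k => (t.flatMap (fun p => [p.1, p.2.1, p.2.2]))[s + 3 * k]? from ?_]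
    · simp only [h0, List.map_cons, ih]
    · funext k
      have : s + 3 * (k + 1) = (s + 3 * k) + 3 := by omega
      simp [Function.comp, this, List.flatMap_cons, List.getElem?_cons_succ]

-- ===== VERDICT =====
theorem depurador_lista3d_spec : Claim_equal_depurador_lista3d := by
  intro c _
  show _ = _
  obtain ⟨l1, l⟩ := c
  unfold depurador_lista3d depurador_lista3d_alt
  simp only [pv_foldl_append_map, List.nil_append]
  cases l with
  | nil => decide
  | cons p t =>
    have hlen := pv_flat_len (p :: t)
    have h3 : 3 ≤ ((p :: t).flatMap (fun p => [p.1, p.2.1, p.2.2])).length := by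
      rw [hlen, List.length_cons]; omega
    have e0 := pv_slice?_nat_from3 ((p :: t).flatMap (fun p => [p.1, p.2.1, p.2.2])) 0 (by omega)
    have e1 := pv_slice?_nat_from3 ((p :: t).flatMap (fun p => [p.1, p.2.1, p.2.2])) 1 (by omega)
    have e2 := pv_slice?_nat_from3 ((p :: t).flatMap (fun p => [p.1, p.2.1, p.2.2])) 2 (by omega)
    simp only [Nat.cast_zero, Nat.cast_one, Nat.cast_ofNat] at e0 e1 e2
    rw [e0, e1, e2]
    have hr0 : (((p :: t).flatMap (fun p => [p.1, p.2.1, p.2.2])).length - 0 + 2) / 3 = (p :: t).length := by rw [hlen]; omega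
    have hr1 : (((p :: t).flatMap (fun p => [p.1, p.2.1, p.2.2])).length - 1 + 2) / 3 = (p :: t).length := by rw [hlen]; omega
    have hr2 : (((p :: t).flatMap (fun p => [p.1, p.2.1, p.2.2])).length - 2 + 2) / 3 = (p :: t).length := by rw [hlen]; omega
    rw [hr0, hr1, hr2,
        pv_stride _ 0 (·.1) (by intro p; rfl) (by omega),
        pv_stride _ 1 (·.2.1) (by intro p; rfl) (by omega),
        pv_stride _ 2 (·.2.2) (by intro p; rfl) (by omega)]
    rfl
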